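-- pv_equiv track=rewrite | github.com/cadyherron/code_samples | divide_a_corridor.py | divide_corridor
-- ===== SOURCE A (Python) =====
-- def divide_corridor(corridor: str) -> int:
--     corr = list(corridor)
--     num_seats = corr.count("S")
--     if len(corr) < 2 or len(corr) == 2 and corr != ["S", "S"] or num_seats % 2:
--         return 0
--
--     if num_seats == 2:
--         return 1
--
--     valid_dividers = set()
--     for divider in range(2, len(corr)):
--         # if left of divider has 2 seats and right of divider has 2 seats, add to valid_dividers
--         left_seats = corr[:divider].count("S")
--         right_seats = corr[divider:].count("S")
--         if left_seats == 2 and right_seats == 2: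
--             valid_dividers.add(divider)
--
--     return len(valid_dividers)
-- ===== SOURCE B (Python) =====
-- def divide_corridor(corridor: str) -> int:
--     n = len(corridor)
--     total = corridor.count("S")
--     if n < 2 or n == 2 and corridor != "SS" or total % 2:
--         return 0
--     if total == 2:
--         return 1
--     if total != 4:
--         return 0
--     # single pass: a divider i (2 <= i < n) is valid iff exactly 2 of the 4
--     # seats lie strictly before it
--     count = 0
--     seen = 0
--     for i, c in enumerate(corridor):
--         if i >= 2 and seen == 2:
--             count += 1
--         if c == "S":
--             seen += 1
--     return count
-- ===== Notes on version B (the rewrite author's own statement) =====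
-- stated objective: faster
-- what changed: A recounts the seats on both sides of every candidate divider (a fresh slice-and-count per position, collected into a set); B makes one pass over the corridor maintaining a running seat count and counts valid dividers on the fly.
import Mathlib
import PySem

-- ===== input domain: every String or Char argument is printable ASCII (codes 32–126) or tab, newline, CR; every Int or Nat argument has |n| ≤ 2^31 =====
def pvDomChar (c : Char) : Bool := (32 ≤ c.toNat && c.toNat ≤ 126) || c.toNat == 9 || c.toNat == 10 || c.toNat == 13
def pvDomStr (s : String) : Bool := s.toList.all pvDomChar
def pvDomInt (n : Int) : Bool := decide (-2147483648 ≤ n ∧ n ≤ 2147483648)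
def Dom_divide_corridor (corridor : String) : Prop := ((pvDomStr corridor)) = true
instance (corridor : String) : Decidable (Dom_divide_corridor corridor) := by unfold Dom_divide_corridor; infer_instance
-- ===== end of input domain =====

-- B replaces A's quadratic per-divider recount of both sides by a single pass that
-- counts seats and valid dividers simultaneously (objective: faster).

-- ===== PORT A =====
def divide_corridor (corridor : String) : Int :=
  let corr := corridor.toList
  let num_seats : Int := (corr.count 'S' : Int)
  if (corr.length : Int) < 2 ∨ ((corr.length : Int) = 2 ∧ corr ≠ ['S', 'S']) ∨ PySem.Int.mod num_seats 2 ≠ 0 then 0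
  else if num_seats = 2 then 1
  else
    let valid : PySem.Set Int := (PySem.List.pyRange 2 (corr.length : Int) 1).foldl
      (fun (s : PySem.Set Int) divider =>
        let left_seats : Int := ((PySem.List.slice corr none (some divider)).count 'S' : Int)
        let right_seats : Int := ((PySem.List.slice corr (some divider) none).count 'S' : Int)
        if left_seats = 2 ∧ right_seats = 2 then PySem.Set.add s divider else s)
      PySem.Set.empty
    PySem.Set.len valid

-- ===== PORT B =====
def divide_corridor_alt (corridor : String) : Int :=
  let n := PySem.Str.len corridor
  let st := (PySem.List.enumerate corridor.toList 0).foldl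
      (fun (st : Int × Int) ic =>
        let st' := if 2 ≤ ic.1 ∧ st.2 = 2 then (st.1 + 1, st.2) else st
        if ic.2 = 'S' then (st'.1, st'.2 + 1) else st') (0, 0)
  if n < 2 ∨ (n = 2 ∧ corridor ≠ "SS") ∨ PySem.Int.mod st.2 2 ≠ 0 then 0
  else if st.2 = 2 then 1
  else if st.2 = 4 then st.1 else 0

-- ===== PRECONDITION & SPEC =====
def Spec_divide_corridor (corridor : String) (out : Int) : Prop := out = divide_corridor_alt corridor
instance (corridor : String) (out : Int) : Decidable (Spec_divide_corridor corridor out) := by unfold Spec_divide_corridor; infer_instance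

-- ===== CLAIM (what is proved, stated in full; the proofs are below) =====
def Claim_equal_divide_corridor : Prop := ∀ (corridor : String), Dom_divide_corridor corridor → Spec_divide_corridor corridor (divide_corridor corridor)

-- ===== LEMMAS AND PROOFS =====

-- B's single pass, characterised: the second component is the seat count, the first
-- counts indices i with 2 ≤ i whose strict prefix holds exactly 2 seats.
theorem bfold_eq (xs : List Char) :
    (PySem.List.enumerate xs 0).foldl
      (fun (st : Int × Int) ic =>
        let st' := if 2 ≤ ic.1 ∧ st.2 = 2 then (st.1 + 1, st.2) else st
        if ic.2 = 'S' then (st'.1, st'.2 + 1) else st') (0, 0) =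
    (((List.range xs.length).countP (fun i => decide (2 ≤ i) && decide ((xs.take i).count 'S' = 2)) : Int),
     (xs.count 'S' : Int)) := by
  induction xs using List.reverseRecOn with
  | nil => simp [PySem.List.enumerate]
  | append_singleton t x ih =>
    rw [PySem.List.enumerate_append, List.foldl_append, ih]
    have htake : ∀ i ∈ List.range t.length, ((t ++ [x]).take i).count 'S' = (t.take i).count 'S' := by
      intro i hi
      rw [List.take_append_of_le_length (by simpa using (List.mem_range.mp hi).le)]
    simp only [List.length_append, List.length_singleton]
    rw [List.range_succ, List.countP_append]
    have hcnt : ∀ i ∈ List.range t.length,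
        ((decide (2 ≤ i) && decide (((t ++ [x]).take i).count 'S' = 2)) = true
          ↔ (decide (2 ≤ i) && decide ((t.take i).count 'S' = 2)) = true) := by
      intro i hi; rw [htake i hi]
    rw [List.countP_congr hcnt]
    rw [PySem.List.enumerate_cons, PySem.List.enumerate_nil]
    simp only [List.foldl_cons, List.foldl_nil]
    have htake2 : (t ++ [x]).take t.length = t := by simp
    by_cases hc : 2 ≤ (t.length : Int) ∧ (t.count 'S' : Int) = 2
    · have h2 : 2 ≤ t.length := by exact_mod_cast hc.1
      have h3 : t.count 'S' = 2 := by exact_mod_cast hc.2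
      by_cases hx : x = 'S' <;>
        simp [hc, hx, htake2, h2, h3, List.count_append]
    · have h' : ¬ (2 ≤ t.length ∧ (t.count 'S' : Int) = 2) := by
        intro ⟨a, b⟩; exact hc ⟨by exact_mod_cast a, b⟩
      have h'' : ¬ (2 ≤ t.length ∧ t.count 'S' = 2) := by
        intro ⟨a, b⟩; exact hc ⟨by exact_mod_cast a, by exact_mod_cast b⟩
      by_cases hx : x = 'S' <;>
        simp [hx, htake2, List.count_append, h', h'']

-- A's set-building loop: adding fresh elements of a nodup list, the final size is a countP
theorem set_foldl_len (p : Int → Prop) [DecidablePred p] :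
    ∀ (l : List Int) (s : List Int), l.Nodup → (∀ x ∈ l, x ∉ s) →
      (l.foldl (fun s d => if p d then PySem.Set.add s d else s) s).length
        = s.length + l.countP (fun d => decide (p d)) := by
  intro l
  induction l with
  | nil => intro s _ _; simp
  | cons a t ih =>
    intro s hnd hdisj
    simp only [List.foldl_cons, List.countP_cons]
    by_cases hp : p a
    · have hna : a ∉ s := hdisj a (by simp)
      have hadd : PySem.Set.add s a = s ++ [a] := by
        simp [PySem.Set.add, PySem.Set.contains, hna]
      rw [if_pos hp, hadd, ih (s ++ [a]) (List.nodup_cons.mp hnd).2]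
      · simp [hp]; omega
      · intro x hx
        simp only [List.mem_append, List.mem_singleton]
        rintro (h | rfl)
        · exact hdisj x (by simp [hx]) h
        · exact (List.nodup_cons.mp hnd).1 hx
    · rw [if_neg hp, ih s (List.nodup_cons.mp hnd).2 (fun x hx => hdisj x (by simp [hx]))]
      simp [hp]

-- restricting a count over range n to the indices ≥ 2
theorem countP_range_ge2 (q : Nat → Bool) (n : Nat) :
    (List.range n).countP (fun i => decide (2 ≤ i) && q i)
      = ((List.range (n - 2)).map (fun k => 2 + k)).countP q := by
  induction n with
  | zero => simp
  | succ m ih =>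
    rw [List.range_succ, List.countP_append, ih]
    by_cases hm : 2 ≤ m
    · have h1 : m + 1 - 2 = (m - 2) + 1 := by omega
      rw [h1, List.range_succ, List.map_append, List.countP_append]
      have h2 : 2 + (m - 2) = m := by omega
      simp [hm, h2, List.countP_cons]
    · have h1 : m + 1 - 2 = 0 := by omega
      have h2 : m - 2 = 0 := by omega
      rw [h1] at *
      simp [hm, h2] at *

theorem main_eq (corridor : String) : divide_corridor corridor = divide_corridor_alt corridor := by
  have h1 : PySem.Str.len corridor = ((corridor.toList.length : Nat) : Int) := by simp
  have h2 : (corridor = "SS") ↔ corridor.toList = ['S', 'S'] := by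
    rw [show (['S', 'S'] : List Char) = "SS".toList from rfl, String.toList_inj]
  simp only [divide_corridor, divide_corridor_alt, bfold_eq, h1, ne_eq, h2]
  set corr := corridor.toList with hc
  by_cases hg : ((corr.length : Int) < 2 ∨ ((corr.length : Int) = 2 ∧ ¬ corr = ['S', 'S']) ∨
      PySem.Int.mod ((corr.count 'S' : Nat) : Int) 2 ≠ 0)
  · simp only [if_pos hg]
  · simp only [if_neg hg]
    by_cases h2s : ((corr.count 'S' : Nat) : Int) = 2
    · simp only [if_pos h2s]
    · simp only [if_neg h2s]
      -- A's loop as a countP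
      have hset : ∀ (l : List Int), l.Nodup →
          (l.foldl
            (fun (s : PySem.Set Int) divider =>
              if ((PySem.List.slice corr none (some divider)).count 'S' : Int) = 2 ∧
                 ((PySem.List.slice corr (some divider) none).count 'S' : Int) = 2
              then PySem.Set.add s divider else s) PySem.Set.empty).length
            = l.countP (fun d => decide (((PySem.List.slice corr none (some d)).count 'S' : Int) = 2 ∧
                 ((PySem.List.slice corr (some d) none).count 'S' : Int) = 2)) := by
        intro l hnd
        have := set_foldl_len
          (fun d => ((PySem.List.slice corr none (some d)).count 'S' : Int) = 2 ∧
                 ((PySem.List.slice corr (some d) none).count 'S' : Int) = 2) l [] hnd (by simp)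
        simpa [PySem.Set.empty] using this
      rw [show (PySem.Set.len = fun (v : List Int) => (v.length : Int)) from rfl]
      simp only []
      rw [hset _ (PySem.List.nodup_pyRange_one _ _)]
      have hcong : ∀ d ∈ PySem.List.pyRange 2 (corr.length : Int) 1,
          (decide (((PySem.List.slice corr none (some d)).count 'S' : Int) = 2 ∧
                 ((PySem.List.slice corr (some d) none).count 'S' : Int) = 2) = true
            ↔ decide ((corr.take d.toNat).count 'S' = 2 ∧ corr.count 'S' = 4) = true) := by
        intro d hd
        have hd2 : 2 ≤ d ∧ d < (corr.length : Int) := (PySem.List.mem_pyRange_one).mp hd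
        have h0 : (0 : Int) ≤ d := by omega
        rw [PySem.List.slice_to corr h0, PySem.List.slice_from corr h0]
        have hsum : (corr.take d.toNat).count 'S' + (corr.drop d.toNat).count 'S' = corr.count 'S' := by
          rw [← List.count_append, List.take_append_drop]
        simp only [decide_eq_true_eq]
        constructor
        · intro ⟨a, b⟩
          have a' : (corr.take d.toNat).count 'S' = 2 := by exact_mod_cast a
          have b' : (corr.drop d.toNat).count 'S' = 2 := by exact_mod_cast b
          exact ⟨a', by omega⟩
        · intro ⟨a, b⟩
          constructor
          · exact_mod_cast a
          · have : (corr.drop d.toNat).count 'S' = 2 := by omega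
            exact_mod_cast this
      rw [List.countP_congr hcong]
      by_cases h4 : corr.count 'S' = 4
      · have h4' : ((corr.count 'S' : Nat) : Int) = 4 := by exact_mod_cast h4
        rw [if_pos h4']
        have hcong2 : ∀ d ∈ PySem.List.pyRange 2 (corr.length : Int) 1,
            (decide ((corr.take d.toNat).count 'S' = 2 ∧ corr.count 'S' = 4) = true
              ↔ decide ((corr.take d.toNat).count 'S' = 2) = true) := by
          intro d _; simp [h4]
        rw [List.countP_congr hcong2]
        rw [countP_range_ge2 (fun m => decide ((corr.take m).count 'S' = 2))]
        rw [PySem.List.pyRange_one, List.countP_map, List.countP_map]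
        have hlen2 : ((corr.length : Int) - 2).toNat = corr.length - 2 := by omega
        rw [hlen2]
        apply congrArg
        apply List.countP_congr
        intro k _
        have hk : ((2 : Int) + (k : Int)).toNat = 2 + k := by omega
        simp [Function.comp, hk]
      · have h4' : ¬ ((corr.count 'S' : Nat) : Int) = 4 := by
          intro h; exact h4 (by exact_mod_cast h)
        rw [if_neg h4']
        have hz : (PySem.List.pyRange 2 (corr.length : Int) 1).countP
            (fun d => decide ((corr.take d.toNat).count 'S' = 2 ∧ corr.count 'S' = 4)) = 0 := by
          apply List.countP_eq_zero.mpr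
          intro d _
          simp [h4]
        rw [hz]
        simp

-- ===== VERDICT (by name: the statement is the Claim_ definition above) =====
theorem divide_corridor_spec : Claim_equal_divide_corridor := by
  intro corridor _
  unfold Spec_divide_corridor
  exact main_eq corridor
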